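-- pv_equiv track=rewrite | github.com/alfredronning/knowit_kalender | 2022/day18/solver.py | finn_flippet_bit
-- ===== SOURCE A (Python) =====
-- def finn_flippet_bit(bits, grupper):
--     for i in range(len(bits)):
--         tilhorende_grupper = []
--         toerpotens = 1
--         while toerpotens < len(bits):
--             tilhorende_grupper.append(i//toerpotens % 2 == 0)
--             toerpotens<<=1
--         if tilhorende_grupper == grupper:
--             return i
-- ===== SOURCE B (Python) =====
-- def finn_flippet_bit(bits, grupper):
--     n = len(bits)
--     k = 0
--     while (1 << k) < n:
--         k += 1
--     if len(grupper) != k: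
--         return None
--     c = 0
--     j = 0
--     for g in grupper:
--         if not g:
--             c += 1 << j
--         j += 1
--     return c if c < n else None
-- ===== Notes on version B (the rewrite author's own statement) =====
-- stated objective: faster
-- what changed: Instead of scanning every index i < len(bits) and rebuilding its bit pattern to compare with grupper, B computes the number of bit positions k with 2^j < len(bits), reconstructs the unique candidate index directly from the boolean list (bit j set iff grupper[j] is False), and bounds-checks it.
import Mathlib
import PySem

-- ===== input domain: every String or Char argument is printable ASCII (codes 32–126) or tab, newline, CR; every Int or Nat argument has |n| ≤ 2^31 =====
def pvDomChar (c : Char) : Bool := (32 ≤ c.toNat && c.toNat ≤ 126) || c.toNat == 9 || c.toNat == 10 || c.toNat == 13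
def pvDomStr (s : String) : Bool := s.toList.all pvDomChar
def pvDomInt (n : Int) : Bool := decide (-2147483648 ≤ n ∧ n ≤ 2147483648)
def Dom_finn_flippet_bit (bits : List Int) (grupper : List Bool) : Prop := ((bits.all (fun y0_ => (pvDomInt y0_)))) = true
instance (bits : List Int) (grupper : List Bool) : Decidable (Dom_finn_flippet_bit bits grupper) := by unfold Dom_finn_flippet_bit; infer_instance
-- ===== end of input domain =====

-- B replaces A's scan of all indices (rebuilding each index's bit pattern) by directly
-- reconstructing the unique candidate index from the boolean list and bounds-checking it.

-- ===== PORT A =====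
-- inner while loop: toerpotens starts at 1 and doubles, collecting i//toerpotens % 2 == 0
def pvTG (n : Nat) (i : Int) (t : Nat) (ht : 0 < t) : List Bool :=
  if h : t < n then
    decide (PySem.Int.mod (PySem.Int.floordiv i (t : Int)) 2 = 0) :: pvTG n i (2 * t) (by omega)
  else []
termination_by n - t
decreasing_by omega

-- outer for loop over range(len(bits))
def pvLoopA (n : Nat) (grupper : List Bool) : List Int → Option Int
  | [] => none
  | i :: rest =>
    if pvTG n i 1 (by omega) = grupper then some i else pvLoopA n grupper rest

def finn_flippet_bit (bits : List Int) (grupper : List Bool) : Option Int :=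
  pvLoopA bits.length grupper (PySem.List.pyRange 0 bits.length 1)

-- ===== PORT B =====
-- while (1 << k) < n: k += 1       (1 << k on a Nat is 2^k)
def pvKOf (n k : Nat) : Nat :=
  if 2 ^ k < n then pvKOf n (k + 1) else k
termination_by n - 2 ^ k
decreasing_by
  have h1 : 2 ^ k < 2 ^ (k + 1) := Nat.pow_lt_pow_right (by norm_num) (Nat.lt_succ_self k)
  omega

-- for g in grupper: if not g: c += 1 << j; j += 1
def pvSumBits : List Bool → Nat → Int → Int
  | [], _, c => c
  | g :: rest, j, c => pvSumBits rest (j + 1) (if !g then c + 2 ^ j else c)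

def finn_flippet_bit_alt (bits : List Int) (grupper : List Bool) : Option Int :=
  let n := bits.length
  let k := pvKOf n 0
  if grupper.length ≠ k then none
  else
    let c := pvSumBits grupper 0 0
    if c < (n : Int) then some c else none

-- ===== PRECONDITION & SPEC =====
def Spec_finn_flippet_bit (bits : List Int) (grupper : List Bool) (out : Option Int) : Prop := out = finn_flippet_bit_alt bits grupper
instance (bits : List Int) (grupper : List Bool) (out : Option Int) : Decidable (Spec_finn_flippet_bit bits grupper out) := by unfold Spec_finn_flippet_bit; infer_instance

-- ===== CLAIM (what is proved, stated in full; the proofs are below) =====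
def Claim_equal_finn_flippet_bit : Prop := ∀ (bits : List Int) (grupper : List Bool), Dom_finn_flippet_bit bits grupper → Spec_finn_flippet_bit bits grupper (finn_flippet_bit bits grupper)

-- ===== LEMMAS AND PROOFS =====

-- the candidate value encoded by a boolean list: bit j set iff g[j] is false
def pvCN : List Bool → Nat
  | [] => 0
  | b :: rest => (if b then 0 else 1) + 2 * pvCN rest

theorem pvKOf_ge (n m : Nat) : m ≤ pvKOf n m := by
  fun_induction pvKOf with
  | case1 k h ih => omega
  | case2 k h => omega

theorem pvKOf_pow_ge (n m : Nat) : n ≤ 2 ^ pvKOf n m := by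
  fun_induction pvKOf with
  | case1 k h ih => exact ih
  | case2 k h => omega

theorem pvBitdec (i p : Nat) :
    decide (PySem.Int.mod (PySem.Int.floordiv (i : Int) ((p : Nat) : Int)) 2 = 0)
      = decide (i / p % 2 = 0) := by
  rw [PySem.Int.floordiv_natCast]
  simp only [decide_eq_decide]
  rw [PySem.Int.mod_eq_zero_iff_dvd]
  omega

theorem pvTG_eq (n : Nat) (i : Nat) :
    ∀ (d m : Nat), n ≤ 2 ^ m + d →
      pvTG n (i : Int) (2 ^ m) (Nat.two_pow_pos m) =
        (List.range' m (pvKOf n m - m)).map (fun j => decide (i / 2 ^ j % 2 = 0)) := by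
  intro d
  induction d with
  | zero =>
    intro m hm
    rw [pvTG]
    have hnot : ¬ (2 ^ m < n) := by omega
    rw [pvKOf]
    simp [hnot]
  | succ d ih =>
    intro m hm
    by_cases h : 2 ^ m < n
    · rw [pvTG]
      simp only [h, dif_pos]
      have h2 : 2 * 2 ^ m = 2 ^ (m + 1) := by ring
      simp only [h2]
      rw [ih (m + 1) (by have := Nat.one_le_two_pow (n := m); omega)]
      have hk1 : pvKOf n m = pvKOf n (m + 1) := by rw [pvKOf]; simp [h]
      have hk2 : m + 1 ≤ pvKOf n (m + 1) := pvKOf_ge n (m + 1)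
      have hlen : pvKOf n m - m = (pvKOf n (m + 1) - (m + 1)) + 1 := by omega
      rw [hlen, List.range'_succ, List.map_cons, pvBitdec]
    · rw [pvTG]
      rw [pvKOf]
      simp [h]

theorem pvListbits_eq (g : List Bool) : ∀ (i : Nat),
    ((List.range g.length).map (fun j => decide (i / 2 ^ j % 2 = 0)) = g)
      ↔ i % 2 ^ g.length = pvCN g := by
  induction g with
  | nil => intro i; simp [pvCN, Nat.mod_one]
  | cons b rest ih =>
    intro i
    have hr : List.range (rest.length + 1) = 0 :: List.range' 1 rest.length := by
      rw [List.range_eq_range', List.range'_succ]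
    have hmap : (List.range' 1 rest.length).map (fun j => decide (i / 2 ^ j % 2 = 0))
        = (List.range rest.length).map (fun j => decide ((i / 2) / 2 ^ j % 2 = 0)) := by
      rw [List.range'_eq_map_range, List.map_map]
      apply List.map_congr_left
      intro j _
      have : i / 2 ^ (1 + j) = i / 2 / 2 ^ j := by
        rw [Nat.div_div_eq_div_mul, pow_add, pow_one]
      simp [this]
    have hmod : i % 2 ^ (rest.length + 1) = i % 2 + 2 * (i / 2 % 2 ^ rest.length) := by
      have h2 : (2 : Nat) ^ (rest.length + 1) = 2 * 2 ^ rest.length := by ring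
      rw [h2, Nat.mod_mul]
    simp only [List.length_cons, hr, List.map_cons, hmap, pow_zero, Nat.div_one]
    rw [List.cons_eq_cons, ih (i / 2), hmod]
    cases b <;> simp [pvCN] <;> omega

theorem pvSumBits_eq (g : List Bool) : ∀ (j : Nat) (c : Int),
    pvSumBits g j c = c + 2 ^ j * (pvCN g : Int) := by
  induction g with
  | nil => intro j c; simp [pvSumBits, pvCN]
  | cons b rest ih =>
    intro j c
    rw [pvSumBits, ih]
    cases b <;> simp [pvCN] <;> ring_nf

theorem pvLoopA_eq (n : Nat) (g : List Bool) : ∀ (l : List Nat),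
    pvLoopA n g (l.map Int.ofNat)
      = (l.find? (fun i : Nat => decide (pvTG n (i : Int) 1 (by omega) = g))).map Int.ofNat := by
  intro l
  induction l with
  | nil => simp [pvLoopA]
  | cons x rest ih =>
    rw [List.map_cons, pvLoopA, List.find?]
    by_cases h : pvTG n (x : Int) 1 (by omega) = g
    · simp [h]
    · simp [h, ih]

theorem pvFind_range (p : Nat → Bool) (c : Nat) : ∀ (n : Nat),
    (∀ i, i < n → (p i = true ↔ i = c)) →
      List.find? p (List.range n) = if c < n then some c else none := by
  intro n
  induction n with
  | zero => intro _; simp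
  | succ n ih =>
    intro hp
    rw [List.range_succ, List.find?_append, ih (fun i hi => hp i (by omega))]
    by_cases hc : c < n
    · have hc1 : c < n + 1 := by omega
      simp [hc, hc1]
    · by_cases hcn : c = n
      · have hpn : p n = true := (hp n (by omega)).mpr hcn.symm
        subst hcn
        simp [hpn, List.find?]
      · have hpn : p n = false := by
          cases hpnv : p n
          · rfl
          · exact absurd ((hp n (by omega)).mp hpnv) (by omega)
        have hc2 : ¬ c < n + 1 := by omega
        simp [hc, hpn, hc2, List.find?]

-- ===== VERDICT (by name: the statement is the Claim_ definition above) =====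
theorem finn_flippet_bit_spec : Claim_equal_finn_flippet_bit := by
  intro bits grupper _dom
  unfold Spec_finn_flippet_bit
  set n := bits.length with hn
  set k := pvKOf n 0 with hk
  have hA : finn_flippet_bit bits grupper
      = ((List.range n).find?
          (fun i : Nat => decide (pvTG n (i : Int) 1 (by omega) = grupper))).map Int.ofNat := by
    rw [finn_flippet_bit, ← hn, PySem.List.pyRange_zero_natCast]
    have hcast : (List.map (fun j : Nat => (j : Int)) (List.range n))
        = List.map Int.ofNat (List.range n) := rfl
    rw [hcast, pvLoopA_eq]
  have htg2 : ∀ i : Nat, pvTG n (i : Int) 1 (by omega)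
      = (List.range' 0 k).map (fun j => decide (i / 2 ^ j % 2 = 0)) := by
    intro i
    have h0 : pvTG n (i : Int) 1 (by omega) = pvTG n (i : Int) (2 ^ 0) (Nat.two_pow_pos 0) := rfl
    rw [h0, pvTG_eq n i n 0 (by omega)]
    simp [hk]
  by_cases hlen : grupper.length = k
  · -- reconstruct the candidate
    have hceq : ∀ i : Nat, i < n →
        ((pvTG n (i : Int) 1 (by omega) = grupper) ↔ i = pvCN grupper) := by
      intro i hi
      rw [htg2 i]
      have hrg : List.range' 0 k = List.range grupper.length := by
        rw [hlen, List.range_eq_range']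
      rw [hrg, pvListbits_eq]
      have h1 : n ≤ 2 ^ k := pvKOf_pow_ge n 0
      have h2 : i % 2 ^ grupper.length = i := Nat.mod_eq_of_lt (by rw [hlen]; omega)
      rw [h2]
    have hfind := pvFind_range
      (fun i : Nat => decide (pvTG n (i : Int) 1 (by omega) = grupper))
      (pvCN grupper) n (by intro i hi; simpa using hceq i hi)
    rw [hA, hfind]
    rw [finn_flippet_bit_alt]
    simp only [← hn, ← hk, hlen, ne_eq, not_true_eq_false, if_false]
    rw [pvSumBits_eq]
    simp only [pow_zero, one_mul, zero_add]
    by_cases hc : pvCN grupper < n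
    · rw [if_pos hc, if_pos (by exact_mod_cast hc)]
      rfl
    · rw [if_neg hc, if_neg (by exact_mod_cast hc)]
      rfl
  · -- lengths differ: nothing matches, both sides are none
    have hnone : (List.range n).find?
        (fun i : Nat => decide (pvTG n (i : Int) 1 (by omega) = grupper)) = none := by
      rw [List.find?_eq_none]
      intro i _
      simp only [decide_eq_true_eq]
      intro hEq
      apply hlen
      rw [← hEq, htg2 i]
      simp
    rw [hA, hnone, finn_flippet_bit_alt]
    simp [← hn, ← hk, hlen]
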